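-- pv_equiv track=rewrite | github.com/Sherin-SEF-AI/RPi-Simulator | packages/feature_planning/task_validator.py | _validate_code_quality
-- ===== SOURCE A (Python) =====
-- from typing import Any, Dict, List, Optional, Tuple
--
-- def _validate_code_quality(content: str) -> Tuple[List[str], List[str]]:
--     """Validate code quality aspects."""
--     issues = []
--     suggestions = []
--
--     # Check for basic Python syntax patterns
--     if content.strip().endswith('.py') or 'def ' in content or 'class ' in content:
--         # Check indentation consistency
--         lines = content.split('\n')
--         indentation_levels = []
--         for line in lines:
--             if line.strip():
--                 leading_spaces = len(line) - len(line.lstrip())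
--                 indentation_levels.append(leading_spaces)
--
--         if indentation_levels and max(indentation_levels) > 0:
--             # Check for consistent indentation (multiples of 4)
--             inconsistent_indents = [level for level in indentation_levels if level % 4 != 0 and level > 0]
--             if inconsistent_indents:
--                 issues.append("Inconsistent indentation detected")
--                 suggestions.append("Use consistent 4-space indentation")
--
--         # Check for docstrings in functions/classes
--         if 'def ' in content and '"""' not in content and "'''" not in content:
--             suggestions.append("Consider adding docstrings to functions and classes")
--
--     return issues, suggestions
-- ===== SOURCE B (Python) =====
-- def _validate_code_quality(content):
--     issues, suggestions = [], []
--     if content.strip().endswith('.py') or 'def ' in content or 'class ' in content: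
--         bad = False
--         lead = 0
--         seen = False
--         for ch in content + '\n':
--             if ch == '\n':
--                 if seen and lead > 0 and lead % 4 != 0:
--                     bad = True
--                 lead = 0
--                 seen = False
--             elif not seen:
--                 if ch.isspace():
--                     lead += 1
--                 else:
--                     seen = True
--         if bad:
--             issues.append("Inconsistent indentation detected")
--             suggestions.append("Use consistent 4-space indentation")
--         if 'def ' in content and '"""' not in content and "'''" not in content:
--             suggestions.append("Consider adding docstrings to functions and classes")
--     return issues, suggestions
-- ===== Notes on version B (the rewrite author's own statement) =====
-- stated objective: alternative
-- what changed: Replaced A's line-oriented passes (split into a line list, fold up a levels list, take its max for a guard, filter it for bad levels) with a single character-level state machine that streams once over the string, tracking per-line leading-whitespace count and a bad flag, never materialising lines or levels.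
import Mathlib
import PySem

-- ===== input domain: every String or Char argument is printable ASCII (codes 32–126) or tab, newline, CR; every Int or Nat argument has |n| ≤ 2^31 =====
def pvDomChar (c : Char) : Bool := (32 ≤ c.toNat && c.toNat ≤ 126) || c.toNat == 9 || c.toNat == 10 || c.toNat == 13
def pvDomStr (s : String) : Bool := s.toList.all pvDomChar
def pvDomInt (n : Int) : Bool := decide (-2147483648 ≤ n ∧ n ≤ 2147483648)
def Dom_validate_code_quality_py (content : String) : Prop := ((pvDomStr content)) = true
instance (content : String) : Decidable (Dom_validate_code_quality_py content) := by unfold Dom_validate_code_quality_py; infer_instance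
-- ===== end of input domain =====

-- B replaces A's split-into-lines + levels-list + max + filter passes with a single
-- character-level state machine over the string (objective: alternative).

-- ===== PORT A =====
-- content.split('\n'): sep ≠ "", so split? is always some; getD [] is never taken (exact).
def validate_code_quality_py (content : String) : List String × List String :=
  let issues : List String := []
  let suggestions : List String := []
  if PySem.Str.endswith (PySem.Str.strip content) ".py"
      || PySem.Str.isIn "def " content || PySem.Str.isIn "class " content then
    let lines := (PySem.Str.split? content "\n").getD []
    let indentation_levels : List Int := lines.foldl (fun acc line =>
      if PySem.Str.strip line ≠ "" then
        acc ++ [PySem.Str.len line - PySem.Str.len (PySem.Str.lstrip line)]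
      else acc) []
    let (issues, suggestions) :=
      if indentation_levels ≠ [] ∧
          0 < ((PySem.List.max? indentation_levels (fun x => x)).getD 0) then
        let inconsistent_indents :=
          indentation_levels.filter (fun level => PySem.Int.mod level 4 ≠ 0 ∧ 0 < level)
        if inconsistent_indents ≠ [] then
          (issues ++ ["Inconsistent indentation detected"],
           suggestions ++ ["Use consistent 4-space indentation"])
        else (issues, suggestions)
      else (issues, suggestions)
    let suggestions :=
      if PySem.Str.isIn "def " content && !PySem.Str.isIn "\"\"\"" content
          && !PySem.Str.isIn "'''" content then
        suggestions ++ ["Consider adding docstrings to functions and classes"]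
      else suggestions
    (issues, suggestions)
  else (issues, suggestions)

-- ===== PORT B =====
-- one step of Source B's per-character loop; state = (bad, lead, seen)
def vcqStep (st : Bool × Int × Bool) (c : Char) : Bool × Int × Bool :=
  if c = '\n' then
    (if st.2.2 && decide (0 < st.2.1) && decide (PySem.Int.mod st.2.1 4 ≠ 0) then true else st.1,
     0, false)
  else if !st.2.2 then
    (if PySem.Chars.isspace c then (st.1, st.2.1 + 1, st.2.2) else (st.1, st.2.1, true))
  else st

def validate_code_quality_py_alt (content : String) : List String × List String :=
  if PySem.Str.endswith (PySem.Str.strip content) ".py"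
      || PySem.Str.isIn "def " content || PySem.Str.isIn "class " content then
    -- for ch in content + '\n': …  (per-character state machine; ch.isspace() → PySem.Chars.isspace)
    let st := (content.toList ++ ['\n']).foldl vcqStep (false, 0, false)
    let bad := st.1
    let issues : List String :=
      if bad then ["Inconsistent indentation detected"] else []
    let suggestions : List String :=
      (if bad then ["Use consistent 4-space indentation"] else []) ++
      (if PySem.Str.isIn "def " content && !PySem.Str.isIn "\"\"\"" content
          && !PySem.Str.isIn "'''" content then
        ["Consider adding docstrings to functions and classes"] else [])
    (issues, suggestions)
  else ([], [])

-- ===== PRECONDITION & SPEC =====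
def Spec_validate_code_quality_py (content : String) (out : List String × List String) : Prop := out = validate_code_quality_py_alt content
instance (content : String) (out : List String × List String) : Decidable (Spec_validate_code_quality_py content out) := by unfold Spec_validate_code_quality_py; infer_instance

-- ===== CLAIM (what is proved, stated in full; the proofs are below) =====
def Claim_equal_validate_code_quality_py : Prop := ∀ (content : String), Dom_validate_code_quality_py content → Spec_validate_code_quality_py content (validate_code_quality_py content)

-- ===== LEMMAS AND PROOFS =====

-- proof-side: the list of '\n'-separated lines of `l`, `pre` being the already-read part of the first line
def vcqLines (pre : List Char) : List Char → List (List Char)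
  | [] => [pre]
  | c :: rest => if c = '\n' then pre :: vcqLines [] rest else vcqLines (pre ++ [c]) rest

-- proof-side: "this line has a positive indent that is not a multiple of 4"
def vcqBadC (l : List Char) : Bool :=
  decide (l.dropWhile PySem.Chars.isspace ≠ []) &&
  decide (0 < ((l.takeWhile PySem.Chars.isspace).length : Int)) &&
  decide (PySem.Int.mod ((l.takeWhile PySem.Chars.isspace).length : Int) 4 ≠ 0)

theorem vcq_go (fuel : Nat) : ∀ (l cur : List Char) (acc : List (List Char)),
    l.length < fuel →
    PySem.Chars.splitOn.go ['\n'] fuel l cur acc = acc.reverse ++ vcqLines cur.reverse l := by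
  induction fuel with
  | zero => intro l cur acc h; omega
  | succ fuel ih =>
    intro l cur acc h
    cases l with
    | nil =>
      rw [PySem.Chars.splitOn.go]
      simp [vcqLines]
      omega
    | cons c rest =>
      by_cases hc : c = '\n'
      · subst hc
        rw [PySem.Chars.splitOn.go]
        simp only [List.isPrefixOf, List.length_cons] at h ⊢
        simp only [beq_self_eq_true, Bool.true_and, if_true,
          List.drop_succ_cons, List.drop_zero, List.length_nil]
        rw [ih rest [] (cur.reverse :: acc) (by omega)]
        simp [vcqLines]
      · rw [PySem.Chars.splitOn.go]
        simp only [List.isPrefixOf, Bool.and_true]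
        rw [if_neg (by simp [Ne.symm hc])]
        rw [ih rest (c :: cur) acc (by simpa using Nat.lt_of_succ_lt_succ h)]
        simp [vcqLines, hc]

theorem vcq_splitOn (s : List Char) :
    PySem.Chars.splitOn s ['\n'] = vcqLines [] s := by
  unfold PySem.Chars.splitOn
  rw [vcq_go (s.length + 1) s [] [] (by omega)]
  simp

theorem vcq_scan (l : List Char) : ∀ (bad : Bool) (pre : List Char),
    (List.foldl vcqStep
      (bad, ((pre.takeWhile PySem.Chars.isspace).length : Int),
        decide (pre.dropWhile PySem.Chars.isspace ≠ [])) (l ++ ['\n'])).1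
    = (bad || (vcqLines pre l).any vcqBadC) := by
  induction l with
  | nil =>
    intro bad pre
    simp only [List.nil_append, List.foldl_cons, List.foldl_nil, vcqLines, List.any_cons,
      List.any_nil, Bool.or_false]
    unfold vcqStep vcqBadC
    simp only [if_pos rfl]
    by_cases h1 : pre.dropWhile PySem.Chars.isspace ≠ [] <;>
      by_cases h2 : 0 < ((pre.takeWhile PySem.Chars.isspace).length : Int) <;>
        by_cases h3 : PySem.Int.mod ((pre.takeWhile PySem.Chars.isspace).length : Int) 4 ≠ 0 <;>
          simp [h1, h2, h3] <;> cases bad <;> simp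
  | cons c rest ih =>
    intro bad pre
    by_cases hc : c = '\n'
    · subst hc
      simp only [List.cons_append, List.foldl_cons]
      have hstep : vcqStep (bad, ((pre.takeWhile PySem.Chars.isspace).length : Int),
          decide (pre.dropWhile PySem.Chars.isspace ≠ [])) '\n'
          = (bad || vcqBadC pre, (((([] : List Char).takeWhile PySem.Chars.isspace).length : Int)),
             decide ((([] : List Char).dropWhile PySem.Chars.isspace) ≠ [])) := by
        unfold vcqStep vcqBadC
        simp only [if_pos rfl]
        by_cases h1 : pre.dropWhile PySem.Chars.isspace ≠ [] <;>
          by_cases h2 : 0 < ((pre.takeWhile PySem.Chars.isspace).length : Int) <;>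
            by_cases h3 : PySem.Int.mod ((pre.takeWhile PySem.Chars.isspace).length : Int) 4 ≠ 0 <;>
              simp only [h1, h2, h3, decide_true, decide_false, decide_not, not_true, not_false_iff,
                Bool.and_true, Bool.and_false, Bool.true_and, Bool.false_and, Bool.not_true,
                Bool.not_false, if_true, if_false] <;> cases bad <;> simp
      rw [hstep, ih]
      simp [vcqLines, Bool.or_assoc]
    · simp only [List.cons_append, List.foldl_cons]
      have hsum := congrArg List.length
        (List.takeWhile_append_dropWhile (p := PySem.Chars.isspace) (l := pre))
      simp only [List.length_append] at hsum
      have hstep : vcqStep (bad, ((pre.takeWhile PySem.Chars.isspace).length : Int),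
          decide (pre.dropWhile PySem.Chars.isspace ≠ [])) c
          = (bad, (((pre ++ [c]).takeWhile PySem.Chars.isspace).length : Int),
             decide ((pre ++ [c]).dropWhile PySem.Chars.isspace ≠ [])) := by
        unfold vcqStep
        rw [if_neg hc, List.takeWhile_append, List.dropWhile_append]
        by_cases hseen : pre.dropWhile PySem.Chars.isspace ≠ []
        · -- seen = true: state unchanged
          have hlenne : (pre.takeWhile PySem.Chars.isspace).length ≠ pre.length := by
            have : 0 < (pre.dropWhile PySem.Chars.isspace).length :=
              List.length_pos_of_ne_nil hseen
            omega
          rw [if_neg hlenne, if_neg (by simpa [List.isEmpty_iff] using hseen)]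
          simp [hseen]
        · -- seen = false: pre is all whitespace
          have hnil : pre.dropWhile PySem.Chars.isspace = [] := by simpa using hseen
          have htake : pre.takeWhile PySem.Chars.isspace = pre := by
            have := List.takeWhile_append_dropWhile (p := PySem.Chars.isspace) (l := pre)
            rw [hnil] at this; simpa using this
          have hlen : (List.takeWhile PySem.Chars.isspace pre).length = pre.length := by
            rw [htake]
          have hempty : (List.dropWhile PySem.Chars.isspace pre).isEmpty = true := by
            simp [hnil]
          have hcond : decide (List.dropWhile PySem.Chars.isspace pre ≠ []) = false := by
            simp [hnil]
          rw [if_pos hlen, if_pos hempty, hcond]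
          by_cases hws : PySem.Chars.isspace c = true
          · simp [htake, List.takeWhile, List.dropWhile, hws]
          · simp [htake, List.takeWhile, List.dropWhile, hws]
      rw [hstep, ih]
      simp [vcqLines, hc]

-- A's per-line level and blank test, phrased on the char list
theorem vcq_strip_ne (l : List Char) :
    PySem.Chars.strip l ≠ [] ↔ l.dropWhile PySem.Chars.isspace ≠ [] := by
  apply not_congr
  unfold PySem.Chars.strip PySem.Chars.rstrip PySem.Chars.lstrip
  constructor
  · intro h
    rw [List.reverse_eq_nil_iff, List.dropWhile_eq_nil_iff] at h
    by_contra hne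
    have hhead := List.head_dropWhile_not PySem.Chars.isspace (l := l) hne
    have hmem : (List.dropWhile PySem.Chars.isspace l).head hne ∈
        (List.dropWhile PySem.Chars.isspace l).reverse :=
      List.mem_reverse.2 (List.head_mem hne)
    exact absurd (h _ hmem) (by simp [hhead])
  · intro h
    rw [h]
    rfl

theorem vcq_lead (l : List Char) :
    (l.length : Int) - ((l.dropWhile PySem.Chars.isspace).length : Int)
      = ((l.takeWhile PySem.Chars.isspace).length : Int) := by
  have := congrArg List.length (List.takeWhile_append_dropWhile (p := PySem.Chars.isspace) (l := l))
  simp only [List.length_append] at this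
  omega

-- A's indentation block fires iff some line is bad in vcqBadC's sense
theorem vcq_key (lines : List String) :
    (let levels : List Int := lines.foldl (fun acc line =>
      if PySem.Str.strip line ≠ "" then
        acc ++ [PySem.Str.len line - PySem.Str.len (PySem.Str.lstrip line)]
      else acc) [];
    levels ≠ [] ∧ 0 < ((PySem.List.max? levels (fun x => x)).getD 0) ∧
      levels.filter (fun level => PySem.Int.mod level 4 ≠ 0 ∧ 0 < level) ≠ []) ↔
    (lines.map String.toList).any vcqBadC = true := by
  have hfold : lines.foldl (fun acc line =>
      if PySem.Str.strip line ≠ "" then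
        acc ++ [PySem.Str.len line - PySem.Str.len (PySem.Str.lstrip line)]
      else acc) [] =
      ([] : List Int) ++ (lines.filter (fun line => decide (PySem.Str.strip line ≠ ""))).map
        (fun line => PySem.Str.len line - PySem.Str.len (PySem.Str.lstrip line)) := by
    rw [show (fun (acc : List Int) (line : String) =>
        if PySem.Str.strip line ≠ "" then
          acc ++ [PySem.Str.len line - PySem.Str.len (PySem.Str.lstrip line)]
        else acc) = (fun acc line =>
        if (fun l => decide (PySem.Str.strip l ≠ "")) line = true then
          acc ++ [PySem.Str.len line - PySem.Str.len (PySem.Str.lstrip line)]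
        else acc) from by funext acc line; simp
      , PySem.List.foldl_append_if]
  have hlineEq : ∀ line : String,
      (decide (PySem.Str.strip line ≠ "") &&
        decide (PySem.Int.mod (PySem.Str.len line - PySem.Str.len (PySem.Str.lstrip line)) 4 ≠ 0) &&
        decide (0 < PySem.Str.len line - PySem.Str.len (PySem.Str.lstrip line))) =
      vcqBadC line.toList := by
    intro line
    have hstrip : (PySem.Str.strip line ≠ "") ↔ line.toList.dropWhile PySem.Chars.isspace ≠ [] := by
      rw [← vcq_strip_ne]
      constructor
      · intro h hnil
        exact h (by
          have : (PySem.Str.strip line).toList = [] := by simp [PySem.Str.toList_strip, hnil]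
          exact String.toList_eq_nil_iff.1 this ▸ rfl)
      · intro h hnil
        apply h
        rw [show PySem.Chars.strip line.toList = (PySem.Str.strip line).toList from
          (PySem.Str.toList_strip line).symm, hnil]
        rfl
    have hlen : PySem.Str.len line - PySem.Str.len (PySem.Str.lstrip line)
        = ((line.toList.takeWhile PySem.Chars.isspace).length : Int) := by
      rw [← vcq_lead]
      have h1 : PySem.Str.len line = (line.toList.length : Int) := by
        simp [pysem]
      have h2 : PySem.Str.len (PySem.Str.lstrip line)
          = ((line.toList.dropWhile PySem.Chars.isspace).length : Int) := by
        rw [show line.toList.dropWhile PySem.Chars.isspace = (PySem.Str.lstrip line).toList from by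
          simp [PySem.Str.toList_lstrip, PySem.Chars.lstrip]]
        simp [pysem]
      rw [h1, h2]
    unfold vcqBadC
    rw [hlen]
    by_cases h1 : line.toList.dropWhile PySem.Chars.isspace ≠ []
    · have h1' : PySem.Str.strip line ≠ "" := hstrip.mpr h1
      by_cases h2 : 0 < ((line.toList.takeWhile PySem.Chars.isspace).length : Int) <;>
        by_cases h3 :
          PySem.Int.mod ((line.toList.takeWhile PySem.Chars.isspace).length : Int) 4 ≠ 0 <;>
          simp [h1, h1', h2, h3, Bool.and_comm]
    · have h1' : ¬ PySem.Str.strip line ≠ "" := fun h => h1 (hstrip.mp h)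
      by_cases h2 : 0 < ((line.toList.takeWhile PySem.Chars.isspace).length : Int) <;>
        by_cases h3 :
          PySem.Int.mod ((line.toList.takeWhile PySem.Chars.isspace).length : Int) 4 ≠ 0 <;>
          simp [h1, h1']
  simp only [hfold, List.nil_append]
  constructor
  · rintro ⟨-, -, hfil⟩
    rcases List.exists_mem_of_ne_nil _ hfil with ⟨lv, hlv⟩
    rw [List.mem_filter] at hlv
    rcases hlv with ⟨hlv, hbad⟩
    rcases List.mem_map.1 hlv with ⟨line, hline, rfl⟩
    rw [List.mem_filter] at hline
    rcases hline with ⟨hline, hstrip⟩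
    refine List.any_eq_true.2 ⟨line.toList, List.mem_map_of_mem hline, ?_⟩
    rw [← hlineEq line]
    simp only [decide_eq_true_eq] at hbad hstrip
    simp only [Bool.and_eq_true, decide_eq_true_eq]
    exact ⟨⟨hstrip, hbad.1⟩, hbad.2⟩
  · intro hany
    rcases List.any_eq_true.1 hany with ⟨cs, hcs, hbad⟩
    rcases List.mem_map.1 hcs with ⟨line, hline, rfl⟩
    rw [← hlineEq line] at hbad
    simp only [Bool.and_eq_true, decide_eq_true_eq] at hbad
    obtain ⟨⟨hstrip, hmod⟩, hpos⟩ := hbad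
    set f := fun line => PySem.Str.len line - PySem.Str.len (PySem.Str.lstrip line) with hf
    have hmem : f line ∈ (lines.filter (fun l => decide (PySem.Str.strip l ≠ ""))).map f :=
      List.mem_map_of_mem (List.mem_filter.2 ⟨hline, by simpa using hstrip⟩)
    have hne : (lines.filter (fun l => decide (PySem.Str.strip l ≠ ""))).map f ≠ [] :=
      List.ne_nil_of_mem hmem
    refine ⟨hne, ?_, ?_⟩
    · cases hmx : PySem.List.max?
          ((lines.filter (fun l => decide (PySem.Str.strip l ≠ ""))).map f)
          (fun x : Int => x) with
      | none => exact absurd ((PySem.List.max?_eq_none_iff _ _).1 hmx) hne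
      | some m =>
        have := PySem.List.max?_isMax hmx (f line) hmem
        simp only [Option.getD_some]
        exact lt_of_lt_of_le hpos this
    · refine List.ne_nil_of_mem (List.mem_filter.2 ⟨hmem, ?_⟩)
      simp only [decide_eq_true_eq]
      exact ⟨hmod, hpos⟩

-- B's scan result equals "some line of A's split is bad"
theorem vcq_scan_eq (content : String) :
    ((content.toList ++ ['\n']).foldl vcqStep (false, 0, false)).1
    = ((((PySem.Str.split? content "\n").getD []).map String.toList).any vcqBadC) := by
  have hsplit : ((PySem.Str.split? content "\n").getD []).map String.toList
      = vcqLines [] content.toList := by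
    rw [← vcq_splitOn]
    have := PySem.Str.split?_map content "\n"
    unfold PySem.Chars.split? at this
    simp only [show ("\n" : String).toList = ['\n'] from rfl] at this
    rw [show PySem.Str.split? content "\n"
        = some (List.map String.ofList (PySem.Chars.splitOn content.toList ['\n'])) from by
      unfold PySem.Str.split? PySem.Chars.split?; rfl]
    simp [Function.comp_def]
  rw [hsplit]
  have := vcq_scan content.toList false []
  simpa using this

-- ===== VERDICT (by name: the statement is the Claim_ definition above) =====
theorem validate_code_quality_py_spec : Claim_equal_validate_code_quality_py := by
  intro content _
  unfold Spec_validate_code_quality_py validate_code_quality_py validate_code_quality_py_alt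
  by_cases hgate : (PySem.Str.endswith (PySem.Str.strip content) ".py"
      || PySem.Str.isIn "def " content || PySem.Str.isIn "class " content) = true
  · simp only [hgate, if_true]
    have hkey := vcq_key ((PySem.Str.split? content "\n").getD [])
    simp only at hkey
    rw [vcq_scan_eq content]
    by_cases hany : ((((PySem.Str.split? content "\n").getD []).map String.toList).any vcqBadC)
        = true
    · obtain ⟨h1, h2, h3⟩ := hkey.2 hany
      simp only [hany, if_true, if_pos (And.intro h1 h2), if_pos h3, List.nil_append]
      split_ifs <;> simp
    · have hnc := fun hc => hany (hkey.1 hc)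
      have hb : ((((PySem.Str.split? content "\n").getD []).map String.toList).any vcqBadC)
          = false := by simpa using hany
      simp only [hb, Bool.false_eq_true, if_false, List.nil_append]
      split_ifs with g1 g2 <;>
        first
          | exact (hnc ⟨g1.1, g1.2, g2⟩).elim
          | simp
  · simp only [hgate]
    simp
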